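-- pv_equiv track=rewrite | github.com/yannickloth/W33-Theory | tests/test_clique_complex_deep_computation.py | _compute_h_vector
-- ===== SOURCE A (Python) =====
-- import math
--
-- def _compute_h_vector(f):
--     """Compute h-vector from f-vector using binomial transform.
--     f = (f0, f1, f2, f3), with f_{-1} = 1 prepended.
--     h_j = sum_{i=0}^{j} (-1)^{j-i} * C(d-i, j-i) * f_{i-1}
--     where d = len(f) = 4 and f_{-1} = 1.
--     """
--     d = len(f)  # dimension + 1 = 4
--     ff = [1] + list(f)  # ff[0] = f_{-1} = 1, ff[1] = f_0, ...
--     h = []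
--     for j in range(d + 1):
--         val = 0
--         for i in range(j + 1):
--             val += ((-1) ** (j - i)) * math.comb(d - i, j - i) * ff[i]
--         h.append(val)
--     return tuple(h)
-- ===== SOURCE B (Python) =====
-- def _compute_h_vector(f):
--     """Horner in (x-1): sum_j h_j x^(d-j) = sum_i ff[i]*(x-1)^(d-i)."""
--     coeffs = ()
--     for v in (1,) + tuple(f):
--         coeffs = tuple(a - b for a, b in zip(coeffs + (v,), (0,) + coeffs))
--     return coeffs
-- ===== Notes on version B (the rewrite author's own statement) =====
-- stated objective: faster
-- what changed: B replaces A's independent binomial sums per h_j (nested loops calling math.comb) by a Horner iteration in (x-1): it maintains one running coefficient list and, per f-entry, multiplies it by (x-1) via a shift-and-subtract zip and appends the entry as the new constant term.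
import Mathlib
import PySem

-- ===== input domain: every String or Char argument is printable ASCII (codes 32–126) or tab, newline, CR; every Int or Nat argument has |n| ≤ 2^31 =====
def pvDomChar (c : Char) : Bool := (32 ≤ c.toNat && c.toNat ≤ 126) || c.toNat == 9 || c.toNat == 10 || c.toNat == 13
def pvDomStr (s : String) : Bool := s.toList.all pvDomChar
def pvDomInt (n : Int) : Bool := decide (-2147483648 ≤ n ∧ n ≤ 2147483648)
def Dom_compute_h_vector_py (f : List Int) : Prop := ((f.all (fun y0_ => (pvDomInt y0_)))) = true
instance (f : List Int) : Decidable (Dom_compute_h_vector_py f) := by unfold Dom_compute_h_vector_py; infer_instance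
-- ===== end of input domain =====

-- B replaces A's independent binomial sums per h_j by a Horner iteration in (x-1) on one
-- maintained coefficient list, avoiding math.comb (measured faster in a timing run).

-- ===== PORT A =====
-- math.comb(n, k) is Nat.choose on the values reached here (both arguments are ≥ 0:
-- i ≤ j ≤ d), and (-1) ** e with e ≥ 0 is (-1 : Int) ^ e.toNat — exact on this domain.
def compute_h_vector_py (f : List Int) : List Int :=
  let d : Int := f.length
  let ff : List Int := [1] ++ f
  let h : List Int :=
    (PySem.List.pyRange 0 (d + 1) 1).foldl
      (fun h j =>
        let val : Int :=
          (PySem.List.pyRange 0 (j + 1) 1).foldl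
            (fun val i =>
              val + (-1 : Int) ^ (j - i).toNat
                    * ((d - i).toNat.choose (j - i).toNat : Int)
                    * PySem.List.pyGetD ff i 0)
            0
        h ++ [val])
      []
  h

-- ===== PORT B =====
-- one Horner step: multiply the maintained coefficient list by (x - 1) and add v
-- as the new constant term; tuple(a - b for a, b in zip(c + (v,), (0,) + c)).
def pvHornerStep (c : List Int) (v : Int) : List Int :=
  List.zipWith (fun a b => a - b) (c ++ [v]) (0 :: c)

def compute_h_vector_py_alt (f : List Int) : List Int :=
  ([1] ++ f).foldl pvHornerStep []

-- ===== PRECONDITION & SPEC =====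
def Spec_compute_h_vector_py (f : List Int) (out : List Int) : Prop := out = compute_h_vector_py_alt f
instance (f : List Int) (out : List Int) : Decidable (Spec_compute_h_vector_py f out) := by unfold Spec_compute_h_vector_py; infer_instance

-- ===== CLAIM (what is proved, stated in full; the proofs are below) =====
def Claim_equal_compute_h_vector_py : Prop := ∀ (f : List Int), Dom_compute_h_vector_py f → Spec_compute_h_vector_py f (compute_h_vector_py f)

-- ===== LEMMAS AND PROOFS =====

-- the common spec: h_j = ∑_{i≤j} (-1)^(j-i) C(k-i, j-i) ff[i]
def pvH (ff : List Int) (k j : Nat) : Int :=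
  ∑ i ∈ Finset.range (j + 1),
    (-1 : Int) ^ (j - i) * ((k - i).choose (j - i) : Int) * ff.getD i 0

lemma pvSumMapRange (n : Nat) (t : Nat → Int) :
    ((List.range n).map t).sum = ∑ i ∈ Finset.range n, t i := by
  induction n with
  | zero => simp
  | succ n ih => simp [List.range_succ, Finset.sum_range_succ, ih]

lemma pvH_zero (ff : List Int) (k : Nat) : pvH ff k 0 = ff.getD 0 0 := by
  simp [pvH]

lemma pvH_overshoot (ff : List Int) (k : Nat) : pvH ff k (k + 1) = ff.getD (k + 1) 0 := by
  unfold pvH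
  rw [Finset.sum_range_succ]
  have h0 : ∀ i ∈ Finset.range (k + 1),
      (-1 : Int) ^ (k + 1 - i) * (((k - i).choose (k + 1 - i) : Nat) : Int) * ff.getD i 0 = 0 := by
    intro i hi
    rw [Finset.mem_range] at hi
    rw [Nat.choose_eq_zero_of_lt (by omega)]
    simp
  rw [Finset.sum_eq_zero h0]
  simp


lemma pvH_pascal (ff : List Int) (k j : Nat) (hjk : j ≤ k) :
    pvH ff (k + 1) (j + 1) = pvH ff k (j + 1) - pvH ff k j := by
  unfold pvH
  rw [Finset.sum_range_succ, Finset.sum_range_succ (f := fun i =>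
    (-1 : Int) ^ (j + 1 - i) * (((k - i).choose (j + 1 - i) : Nat) : Int) * ff.getD i 0)]
  have hlast : (-1 : Int) ^ (j + 1 - (j + 1)) * (((k + 1 - (j + 1)).choose (j + 1 - (j + 1)) : Nat) : Int) * ff.getD (j + 1) 0
      = (-1 : Int) ^ (j + 1 - (j + 1)) * (((k - (j + 1)).choose (j + 1 - (j + 1)) : Nat) : Int) * ff.getD (j + 1) 0 := by
    simp
  rw [hlast]
  have hterm : ∀ i ∈ Finset.range (j + 1),
      (-1 : Int) ^ (j + 1 - i) * (((k + 1 - i).choose (j + 1 - i) : Nat) : Int) * ff.getD i 0 =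
      (-1 : Int) ^ (j + 1 - i) * (((k - i).choose (j + 1 - i) : Nat) : Int) * ff.getD i 0 -
      (-1 : Int) ^ (j - i) * (((k - i).choose (j - i) : Nat) : Int) * ff.getD i 0 := by
    intro i hi
    rw [Finset.mem_range] at hi
    have e1 : k + 1 - i = (k - i) + 1 := by omega
    have e2 : j + 1 - i = (j - i) + 1 := by omega
    rw [e1, e2, Nat.choose_succ_succ]
    push_cast
    rw [pow_succ]
    ring
  rw [Finset.sum_congr rfl hterm, Finset.sum_sub_distrib]
  ring

lemma pvH_append (l l' : List Int) (k j : Nat) (hj : j < l.length) :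
    pvH (l ++ l') k j = pvH l k j := by
  unfold pvH
  refine Finset.sum_congr rfl (fun i hi => ?_)
  rw [Finset.mem_range] at hi
  rw [List.getD_append _ _ _ _ (by omega)]

lemma pvB_main (l : List Int) (hl : l ≠ []) :
    l.foldl pvHornerStep [] = (List.range l.length).map (pvH l (l.length - 1)) := by
  induction l using List.reverseRecOn with
  | nil => exact absurd rfl hl
  | append_singleton l v ih =>
    rcases eq_or_ne l [] with rfl | hne
    · simp [pvHornerStep, pvH, List.range_succ]
    · have hfold : (l ++ [v]).foldl pvHornerStep [] = pvHornerStep (l.foldl pvHornerStep []) v := by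
        rw [List.foldl_append]; rfl
      rw [hfold, ih hne]
      have hn1 : 1 ≤ l.length := List.length_pos_of_ne_nil hne
      set n := l.length with hn
      set cs := (List.range n).map (pvH l (n - 1)) with hc
      have hclen : cs.length = n := by simp [hc]
      have hcget : ∀ (m : Nat) (hm : m < cs.length), cs[m]'hm = pvH l (n - 1) m := by
        intro m hm
        simp [hc]
      have hlen : (pvHornerStep cs v).length = n + 1 := by
        simp [pvHornerStep, hclen]
      apply List.ext_getElem
      · simp [hlen, hn]
      · intro j hj1 hj2
        have hj : j < n + 1 := by rw [hlen] at hj1; exact hj1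
        have hget : (pvHornerStep cs v)[j]'hj1 =
            (cs ++ [v])[j]'(by simp only [List.length_append, List.length_cons, hclen]; omega) - (0 :: cs)[j]'(by simp only [List.length_cons, hclen]; omega) := by
          simp [pvHornerStep]
        have hRHS : ((List.range (n + 1)).map (pvH (l ++ [v]) ((l ++ [v]).length - 1)))[j]'(by simpa using hj) =
            pvH (l ++ [v]) n j := by
          simp [hn]
        have hgoal : (pvHornerStep cs v)[j]'hj1 = pvH (l ++ [v]) n j := by
          rw [hget]
          match j, hj with
          | 0, _ =>
            have h1 : (cs ++ [v])[0]'(by simp only [List.length_append, List.length_cons, hclen]; omega) = pvH l (n - 1) 0 := by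
              rw [List.getElem_append_left (by omega)]
              exact hcget 0 (by omega)
            rw [List.getElem_cons_zero, sub_zero, h1,
              pvH_append l [v] n 0 (by omega)]
            rw [pvH_zero, pvH_zero]
          | (m + 1), hj =>
            have h2 : (0 :: cs)[m + 1]'(by simp only [List.length_cons, hclen]; omega) = pvH l (n - 1) m := by
              rw [List.getElem_cons_succ]
              exact hcget m (by omega)
            rcases Nat.lt_or_ge (m + 1) n with hlt | hge
            · -- interior coefficient: Pascal
              have h1 : (cs ++ [v])[m + 1]'(by simp only [List.length_append, List.length_cons, hclen]; omega) = pvH l (n - 1) (m + 1) := by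
                rw [List.getElem_append_left (by omega)]
                exact hcget (m + 1) (by omega)
              have hnm : n = (n - 1) + 1 := by omega
              have hp : pvH l n (m + 1) = pvH l (n - 1) (m + 1) - pvH l (n - 1) m := by
                have hpas := pvH_pascal l (n - 1) m (by omega)
                rwa [← hnm] at hpas
              rw [h1, h2, pvH_append l [v] n (m + 1) (by omega), hp]
            · -- last coefficient
              have hmn : m + 1 = n := by omega
              have h1 : (cs ++ [v])[m + 1]'(by simp only [List.length_append, List.length_cons, hclen]; omega) = v := by
                rw [List.getElem_append_right (by omega)]
                have hcl : m + 1 - cs.length = 0 := by omega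
                simp [hcl]
              rw [h1, h2]
              have hv : (l ++ [v]).getD (m + 1) 0 = v := by
                rw [List.getD_append_right _ _ _ _ (by omega)]
                have h0 : m + 1 - l.length = 0 := by omega
                rw [h0]
                rfl
              have hn' : n = m + 1 := hmn.symm
              rw [hn', Nat.add_sub_cancel,
                pvH_pascal (l ++ [v]) m m (le_refl m), pvH_overshoot, hv,
                pvH_append l [v] m m (by omega)]
        rw [hgoal, hRHS.symm]
        congr 1
        simp [hn]

lemma pvA_main (f : List Int) :
    compute_h_vector_py f = (List.range (f.length + 1)).map (pvH ([1] ++ f) f.length) := by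
  simp only [compute_h_vector_py]
  have hb : ((f.length : Int) + 1) = ((f.length + 1 : Nat) : Int) := by push_cast; ring
  rw [hb, PySem.List.pyRange_zero_nat, List.foldl_map,
    PySem.List.foldl_append_singleton_eq_map]
  rw [List.nil_append]
  refine List.map_congr_left (fun jN hjN => ?_)
  rw [List.mem_range] at hjN
  have hbj : ((jN : Int) + 1) = ((jN + 1 : Nat) : Int) := by push_cast; ring
  rw [hbj, PySem.List.pyRange_zero_nat, List.foldl_map, PySem.List.foldl_add]
  rw [zero_add, pvSumMapRange]
  unfold pvH
  refine Finset.sum_congr rfl (fun iN hiN => ?_)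
  rw [Finset.mem_range] at hiN
  have h1 : ((jN : Int) - (iN : Int)).toNat = jN - iN := by omega
  have h2 : (((f.length : Nat) : Int) - (iN : Int)).toNat = f.length - iN := by omega
  rw [h1, h2, PySem.List.pyGetD_natCast]

-- ===== VERDICT (by name: the statement is the Claim_ definition above) =====
theorem compute_h_vector_py_spec : Claim_equal_compute_h_vector_py := by
  intro f _
  unfold Spec_compute_h_vector_py compute_h_vector_py_alt
  rw [pvA_main f, pvB_main ([1] ++ f) (by simp)]
  simp
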